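-- pv_equiv track=rewrite | github.com/breadbored/butano-tutorial-series | chapter-3-entities/scripts/convert-sprites.py | find_color_depth_and_unused_color
-- ===== SOURCE A (Python) =====
-- def find_color_depth_and_unused_color(
--     img_data_rgba,
-- ) -> tuple[int, tuple[int, int, int] | None]:
--     used_colors = set([(x[0], x[1], x[2]) for x in img_data_rgba if x[3] == 255])
--     color_depth = 16 if len(used_colors) <= 16 else 256
--
--     def _find_unused_color():
--         for r in range(256):
--             for g in range(256):
--                 for b in range(256):
--                     if (r, g, b) not in used_colors:
--                         return (r, g, b)
--         return None
--
--     unused_color = _find_unused_color()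
--
--     return (color_depth, unused_color)
-- ===== SOURCE B (Python) =====
-- def find_color_depth_and_unused_color(
--     img_data_rgba,
-- ) -> tuple[int, tuple[int, int, int] | None]:
--     used_colors = set([(x[0], x[1], x[2]) for x in img_data_rgba if x[3] == 255])
--     color_depth = 16 if len(used_colors) <= 16 else 256
--
--     codes = sorted({r * 65536 + g * 256 + b
--                     for (r, g, b) in used_colors
--                     if 0 <= r < 256 and 0 <= g < 256 and 0 <= b < 256})
--     expected = 0
--     for c in codes:
--         if c == expected:
--             expected += 1
--         elif c > expected:
--             break
--     if expected >= 16777216: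
--         unused_color = None
--     else:
--         unused_color = (expected // 65536, (expected // 256) % 256, expected % 256)
--
--     return (color_depth, unused_color)
-- ===== Notes on version B (the rewrite author's own statement) =====
-- stated objective: alternative
-- what changed: Replaces A's triple nested scan over all 2^24 candidate colors with sorting the used in-range color codes (r*65536+g*256+b) and walking the sorted list once to find the smallest missing code, which is decoded back to (r,g,b).
import Mathlib
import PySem

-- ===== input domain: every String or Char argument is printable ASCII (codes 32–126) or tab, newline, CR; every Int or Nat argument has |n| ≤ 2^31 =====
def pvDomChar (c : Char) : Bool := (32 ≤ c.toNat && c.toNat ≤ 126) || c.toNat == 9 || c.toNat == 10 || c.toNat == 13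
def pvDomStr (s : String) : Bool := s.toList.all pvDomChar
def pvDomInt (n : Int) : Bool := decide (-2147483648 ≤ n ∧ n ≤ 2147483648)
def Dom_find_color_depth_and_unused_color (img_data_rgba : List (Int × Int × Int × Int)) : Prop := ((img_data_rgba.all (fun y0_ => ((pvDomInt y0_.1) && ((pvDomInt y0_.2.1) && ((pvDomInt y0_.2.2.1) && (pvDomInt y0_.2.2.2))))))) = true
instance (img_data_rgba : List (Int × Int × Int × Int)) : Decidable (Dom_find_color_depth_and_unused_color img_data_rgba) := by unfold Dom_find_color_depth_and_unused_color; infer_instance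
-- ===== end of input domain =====

-- B replaces A's triple nested candidate scan by sorting the used colour codes and walking them
-- once for the smallest gap (objective: alternative / simpler search).

-- ===== PORT A =====
def find_color_depth_and_unused_color (img_data_rgba : List (Int × Int × Int × Int)) : Int × (Option (Int × Int × Int)) :=
  let used_colors : PySem.Set (Int × Int × Int) :=
    PySem.Set.ofList ((img_data_rgba.filter (fun x => x.2.2.2 == 255)).map (fun x => (x.1, x.2.1, x.2.2.1)))
  let color_depth : Int := if PySem.Set.len used_colors ≤ 16 then 16 else 256
  let unused_color : Option (Int × Int × Int) :=
    (PySem.List.pyRange 0 256 1).findSome? (fun r =>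
      (PySem.List.pyRange 0 256 1).findSome? (fun g =>
        (PySem.List.pyRange 0 256 1).findSome? (fun b =>
          if PySem.Set.contains used_colors (r, g, b) then none else some (r, g, b))))
  (color_depth, unused_color)

-- ===== PORT B =====
-- 'for c in codes: if c == expected: expected += 1 elif c > expected: break'
def pvWalk : List Int → Int → Int
  | [], e => e
  | c :: cs, e => if c = e then pvWalk cs (e + 1) else if e < c then e else pvWalk cs e

def find_color_depth_and_unused_color_alt (img_data_rgba : List (Int × Int × Int × Int)) : Int × (Option (Int × Int × Int)) :=
  let used_colors : PySem.Set (Int × Int × Int) :=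
    PySem.Set.ofList ((img_data_rgba.filter (fun x => x.2.2.2 == 255)).map (fun x => (x.1, x.2.1, x.2.2.1)))
  let color_depth : Int := if PySem.Set.len used_colors ≤ 16 then 16 else 256
  let codes : List Int :=
    PySem.List.sorted (PySem.Set.ofList
      ((used_colors.filter (fun t =>
          decide (0 ≤ t.1) && decide (t.1 < 256) && decide (0 ≤ t.2.1) && decide (t.2.1 < 256) &&
          decide (0 ≤ t.2.2) && decide (t.2.2 < 256))).map
        (fun t => t.1 * 65536 + t.2.1 * 256 + t.2.2))) (fun x => x) false
  let expected : Int := pvWalk codes 0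
  let unused_color : Option (Int × Int × Int) :=
    if 16777216 ≤ expected then none
    else some (PySem.Int.floordiv expected 65536,
               PySem.Int.mod (PySem.Int.floordiv expected 256) 256,
               PySem.Int.mod expected 256)
  (color_depth, unused_color)

-- ===== PRECONDITION & SPEC =====
def Spec_find_color_depth_and_unused_color (img_data_rgba : List (Int × Int × Int × Int)) (out : Int × (Option (Int × Int × Int))) : Prop := out = find_color_depth_and_unused_color_alt img_data_rgba
instance (img_data_rgba : List (Int × Int × Int × Int)) (out : Int × (Option (Int × Int × Int))) : Decidable (Spec_find_color_depth_and_unused_color img_data_rgba out) := by unfold Spec_find_color_depth_and_unused_color; infer_instance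

-- ===== CLAIM (what is proved, stated in full; the proofs are below) =====
def Claim_equal_find_color_depth_and_unused_color : Prop := ∀ (img_data_rgba : List (Int × Int × Int × Int)), Dom_find_color_depth_and_unused_color img_data_rgba → Spec_find_color_depth_and_unused_color img_data_rgba (find_color_depth_and_unused_color img_data_rgba)

-- ===== LEMMAS AND PROOFS =====

-- the code list B sorts, as a function of the used-colour set
def pvCodes (S : List (Int × Int × Int)) : List Int :=
  PySem.List.sorted (PySem.Set.ofList
    ((S.filter (fun t =>
        decide (0 ≤ t.1) && decide (t.1 < 256) && decide (0 ≤ t.2.1) && decide (t.2.1 < 256) &&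
        decide (0 ≤ t.2.2) && decide (t.2.2 < 256))).map
      (fun t => t.1 * 65536 + t.2.1 * 256 + t.2.2))) (fun x => x) false

lemma pvMem_codes (S : List (Int × Int × Int)) (k : Int) :
    k ∈ pvCodes S ↔ (0 ≤ k ∧ k < 16777216 ∧ (k / 65536, k / 256 % 256, k % 256) ∈ S) := by
  unfold pvCodes
  rw [(PySem.List.sorted_perm _ _ _).mem_iff, PySem.Set.mem_ofList, List.mem_map]
  constructor
  · rintro ⟨t, ht, rfl⟩
    rw [List.mem_filter] at ht
    obtain ⟨htS, hp⟩ := ht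
    simp only [Bool.and_eq_true, decide_eq_true_eq] at hp
    obtain ⟨⟨⟨⟨⟨h1, h2⟩, h3⟩, h4⟩, h5⟩, h6⟩ := hp
    refine ⟨by omega, by omega, ?_⟩
    have e1 : (t.1 * 65536 + t.2.1 * 256 + t.2.2) / 65536 = t.1 := by omega
    have e2 : (t.1 * 65536 + t.2.1 * 256 + t.2.2) / 256 % 256 = t.2.1 := by omega
    have e3 : (t.1 * 65536 + t.2.1 * 256 + t.2.2) % 256 = t.2.2 := by omega
    rw [e1, e2, e3]
    exact htS
  · rintro ⟨h0, h1, hS⟩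
    refine ⟨(k / 65536, k / 256 % 256, k % 256), ?_, by dsimp only; omega⟩
    rw [List.mem_filter]
    refine ⟨hS, ?_⟩
    simp only [Bool.and_eq_true, decide_eq_true_eq]
    omega

lemma pvWalk_spec (C : List Int) (e : Int) (hs : C.Pairwise (· < ·)) (hge : ∀ c ∈ C, e ≤ c) :
    e ≤ pvWalk C e ∧ pvWalk C e ∉ C ∧ ∀ k, e ≤ k → k < pvWalk C e → k ∈ C := by
  induction C generalizing e with
  | nil => refine ⟨le_refl e, by simp [pvWalk], ?_⟩; intro k h1 h2; simp [pvWalk] at h2; omega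
  | cons c cs ih =>
    rw [List.pairwise_cons] at hs
    obtain ⟨hhead, hcs⟩ := hs
    have hc := hge c (by simp)
    by_cases h1 : c = e
    · subst h1
      have hge' : ∀ c' ∈ cs, c + 1 ≤ c' := fun c' hc' => by have := hhead c' hc'; omega
      obtain ⟨w1, w2, w3⟩ := ih (c + 1) hcs hge'
      have hw : pvWalk (c :: cs) c = pvWalk cs (c + 1) := by simp [pvWalk]
      rw [hw]
      refine ⟨by omega, ?_, ?_⟩
      · intro hmem
        rcases List.mem_cons.1 hmem with h | h
        · omega
        · exact w2 h
      · intro k hk1 hk2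
        by_cases hkc : k = c
        · simp [hkc]
        · exact List.mem_cons_of_mem _ (w3 k (by omega) hk2)
    · have hlt : e < c := lt_of_le_of_ne hc (fun h => h1 h.symm)
      have hw : pvWalk (c :: cs) e = e := by simp [pvWalk, h1, hlt]
      rw [hw]
      refine ⟨le_refl e, ?_, ?_⟩
      · intro hmem
        rcases List.mem_cons.1 hmem with h | h
        · omega
        · have := hhead e h
          omega
      · intro k h1 h2; omega

lemma pvInner_none (S : List (Int × Int × Int)) (r g : Int)
    (h : ∀ b, 0 ≤ b → b < 256 → (r, g, b) ∈ S) :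
    (PySem.List.pyRange 0 256 1).findSome? (fun b =>
      if PySem.Set.contains S (r, g, b) then none else some (r, g, b)) = none := by
  rw [List.findSome?_eq_none_iff]
  intro b hb
  rw [PySem.List.mem_pyRange_one] at hb
  rw [if_pos ((PySem.Set.contains_iff S _).2 (h b hb.1 hb.2))]

lemma pvRange_some {α : Type} (m : Int) (f : Int → Option α) (v : α)
    (h1 : 0 ≤ m) (h2 : m < 256) (h3 : ∀ k, 0 ≤ k → k < m → f k = none) (h4 : f m = some v) :
    (PySem.List.pyRange 0 256 1).findSome? f = some v := by
  rw [PySem.List.pyRange_one_append 0 m 256 h1 (le_of_lt h2), List.findSome?_append]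
  have hnone : (PySem.List.pyRange 0 m 1).findSome? f = none := by
    rw [List.findSome?_eq_none_iff]
    intro x hx
    rw [PySem.List.mem_pyRange_one] at hx
    exact h3 x hx.1 hx.2
  rw [hnone, PySem.List.pyRange_one_cons h2, List.findSome?_cons, h4]
  rfl

lemma pvRange_none {α : Type} (f : Int → Option α)
    (h : ∀ k, 0 ≤ k → k < 256 → f k = none) :
    (PySem.List.pyRange 0 256 1).findSome? f = none := by
  rw [List.findSome?_eq_none_iff]
  intro x hx
  rw [PySem.List.mem_pyRange_one] at hx
  exact h x hx.1 hx.2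

lemma pvSearch_eq (S : List (Int × Int × Int)) :
    ((PySem.List.pyRange 0 256 1).findSome? (fun r =>
      (PySem.List.pyRange 0 256 1).findSome? (fun g =>
        (PySem.List.pyRange 0 256 1).findSome? (fun b =>
          if PySem.Set.contains S (r, g, b) then none else some (r, g, b)))))
    = (if 16777216 ≤ pvWalk (pvCodes S) 0 then none
       else some (PySem.Int.floordiv (pvWalk (pvCodes S) 0) 65536,
                  PySem.Int.mod (PySem.Int.floordiv (pvWalk (pvCodes S) 0) 256) 256,
                  PySem.Int.mod (pvWalk (pvCodes S) 0) 256)) := by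
  have hsorted : (pvCodes S).Pairwise (· < ·) := PySem.List.sorted_ofList_pairwise_lt _
  have hge : ∀ c ∈ pvCodes S, (0 : Int) ≤ c := fun c hc => ((pvMem_codes S c).1 hc).1
  obtain ⟨hm0, hmnot, hmbelow⟩ := pvWalk_spec (pvCodes S) 0 hsorted hge
  set m := pvWalk (pvCodes S) 0 with hm
  have hmemS : ∀ k : Int, 0 ≤ k → k < m → (k / 65536, k / 256 % 256, k % 256) ∈ S :=
    fun k hk1 hk2 => ((pvMem_codes S k).1 (hmbelow k hk1 hk2)).2.2
  have hm24 : m ≤ 16777216 := by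
    by_contra h
    have := (pvMem_codes S 16777216).1 (hmbelow 16777216 (by omega) (by omega))
    omega
  by_cases hfull : 16777216 ≤ m
  · rw [if_pos hfull]
    apply pvRange_none
    intro r hr1 hr2
    apply pvRange_none
    intro g hg1 hg2
    apply pvInner_none
    intro b hb1 hb2
    have hk := hmemS (r * 65536 + g * 256 + b) (by omega) (by omega)
    have e1 : (r * 65536 + g * 256 + b) / 65536 = r := by omega
    have e2 : (r * 65536 + g * 256 + b) / 256 % 256 = g := by omega
    have e3 : (r * 65536 + g * 256 + b) % 256 = b := by omega
    rwa [e1, e2, e3] at hk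
  · have hmlt : m < 16777216 := by omega
    rw [if_neg hfull]
    have hnotS : (m / 65536, m / 256 % 256, m % 256) ∉ S := by
      intro hS
      exact hmnot ((pvMem_codes S m).2 ⟨hm0, hmlt, hS⟩)
    rw [PySem.Int.floordiv_eq_ediv_of_pos (by norm_num),
        PySem.Int.floordiv_eq_ediv_of_pos (by norm_num),
        PySem.Int.mod_eq_emod_of_pos (by norm_num),
        PySem.Int.mod_eq_emod_of_pos (by norm_num)]
    apply pvRange_some (m / 65536) _ _ (by omega) (by omega)
    · -- rows before m / 65536 are fully used
      intro r hr1 hr2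
      apply pvRange_none
      intro g hg1 hg2
      apply pvInner_none
      intro b hb1 hb2
      have hk := hmemS (r * 65536 + g * 256 + b) (by omega) (by omega)
      have e1 : (r * 65536 + g * 256 + b) / 65536 = r := by omega
      have e2 : (r * 65536 + g * 256 + b) / 256 % 256 = g := by omega
      have e3 : (r * 65536 + g * 256 + b) % 256 = b := by omega
      rwa [e1, e2, e3] at hk
    · apply pvRange_some (m / 256 % 256) _ _ (by omega) (by omega)
      · intro g hg1 hg2
        apply pvInner_none
        intro b hb1 hb2
        have hk := hmemS (m / 65536 * 65536 + g * 256 + b) (by omega) (by omega)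
        have e1 : (m / 65536 * 65536 + g * 256 + b) / 65536 = m / 65536 := by omega
        have e2 : (m / 65536 * 65536 + g * 256 + b) / 256 % 256 = g := by omega
        have e3 : (m / 65536 * 65536 + g * 256 + b) % 256 = b := by omega
        rwa [e1, e2, e3] at hk
      · apply pvRange_some (m % 256) _ _ (by omega) (by omega)
        · intro b hb1 hb2
          have hk := hmemS (m / 65536 * 65536 + m / 256 % 256 * 256 + b) (by omega) (by omega)
          have e1 : (m / 65536 * 65536 + m / 256 % 256 * 256 + b) / 65536 = m / 65536 := by omega
          have e2 : (m / 65536 * 65536 + m / 256 % 256 * 256 + b) / 256 % 256 = m / 256 % 256 := by omega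
          have e3 : (m / 65536 * 65536 + m / 256 % 256 * 256 + b) % 256 = b := by omega
          rw [if_pos]
          exact (PySem.Set.contains_iff S _).2 (by rwa [e1, e2, e3] at hk)
        · rw [if_neg]
          intro hcon
          exact hnotS ((PySem.Set.contains_iff S _).1 hcon)

-- ===== VERDICT (by name: the statement is the Claim_ definition above) =====
theorem find_color_depth_and_unused_color_spec : Claim_equal_find_color_depth_and_unused_color := by
  intro img _
  unfold Spec_find_color_depth_and_unused_color
  unfold find_color_depth_and_unused_color find_color_depth_and_unused_color_alt
  refine Prod.ext rfl ?_
  exact pvSearch_eq _
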